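-- pv_equiv track=rewrite | github.com/RaitoBezarius/reforme-turnage-ens2020 | notebooks/simulation/run_test.py | extract_kpi
-- ===== SOURCE A (Python) =====
-- def extract_kpi(raw_simulation_result):
--     cats = ["A", "B", "C"]
--     kpis = {}
--     for c in cats:
--         individuals = [i for i in raw_simulation_result if i['cat'] == c]
--         c_loge = sum(1 for individual in individuals if individual['thurne'])
--         kpis[f"{c}_total"] = len(individuals)
--         kpis[f"{c}_logé"] = c_loge
--
--     return kpis
-- ===== SOURCE B (Python) =====
-- def extract_kpi(raw_simulation_result):
--     ta = la = tb = lb = tc = lc = 0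
--     for i in raw_simulation_result:
--         cat = i['cat']
--         if cat == 'A':
--             ta += 1
--             if i['thurne']:
--                 la += 1
--         elif cat == 'B':
--             tb += 1
--             if i['thurne']:
--                 lb += 1
--         elif cat == 'C':
--             tc += 1
--             if i['thurne']:
--                 lc += 1
--     return {"A_total": ta, "A_logé": la, "B_total": tb, "B_logé": lb,
--             "C_total": tc, "C_logé": lc}
-- ===== Notes on version B (the rewrite author's own statement) =====
-- stated objective: alternative
-- what changed: Replaces A's three filter-then-count passes over the whole list (one per category) with a single pass maintaining six scalar counters, building the result dict once at the end.
import Mathlib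
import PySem

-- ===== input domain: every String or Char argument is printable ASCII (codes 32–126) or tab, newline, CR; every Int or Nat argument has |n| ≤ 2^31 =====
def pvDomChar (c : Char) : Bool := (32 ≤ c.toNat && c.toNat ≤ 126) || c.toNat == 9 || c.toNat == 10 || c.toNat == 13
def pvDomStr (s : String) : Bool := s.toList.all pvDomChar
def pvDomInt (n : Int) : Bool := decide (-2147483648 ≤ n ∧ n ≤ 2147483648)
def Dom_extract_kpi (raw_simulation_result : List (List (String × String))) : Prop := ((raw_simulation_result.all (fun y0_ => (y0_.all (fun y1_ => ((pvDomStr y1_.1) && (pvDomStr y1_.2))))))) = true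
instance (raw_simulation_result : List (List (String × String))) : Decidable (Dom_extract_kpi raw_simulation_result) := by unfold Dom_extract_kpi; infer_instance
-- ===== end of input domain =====

-- B replaces A's three filter-then-count passes (one per category) with a single pass over the
-- list maintaining six scalar counters (objective: alternative single-pass decomposition).

-- ===== PORT A =====
-- i['cat'] / i['thurne'] ported as getD with default ""; Pre_ excludes the missing-key inputs
-- on which Python raises KeyError, so the default is never the looked-up value inside Pre_.
def extract_kpi (raw_simulation_result : List (List (String × String))) : List (String × Int) :=
  let cats := ["A", "B", "C"]
  let kpis : PySem.Dict String Int := PySem.Dict.empty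
  (cats.foldl (fun kpis c =>
    let individuals := raw_simulation_result.filter
      (fun i => (PySem.Dict.mk i).getD "cat" "" == c)
    let c_loge : Int := individuals.foldl
      (fun acc individual => if (PySem.Dict.mk individual).getD "thurne" "" ≠ "" then acc + 1 else acc) 0
    let kpis := kpis.insert (c ++ "_total") (individuals.length : Int)
    kpis.insert (c ++ "_logé") c_loge) kpis).items

-- ===== PORT B =====
def extract_kpi_alt (raw_simulation_result : List (List (String × String))) : List (String × Int) :=
  let s := raw_simulation_result.foldl
    (fun (s : Int × Int × Int × Int × Int × Int) i =>
      let (ta, la, tb, lb, tc, lc) := s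
      let cat := (PySem.Dict.mk i).getD "cat" ""
      if cat == "A" then
        (ta + 1, (if (PySem.Dict.mk i).getD "thurne" "" ≠ "" then la + 1 else la), tb, lb, tc, lc)
      else if cat == "B" then
        (ta, la, tb + 1, (if (PySem.Dict.mk i).getD "thurne" "" ≠ "" then lb + 1 else lb), tc, lc)
      else if cat == "C" then
        (ta, la, tb, lb, tc + 1, (if (PySem.Dict.mk i).getD "thurne" "" ≠ "" then lc + 1 else lc))
      else s)
    (0, 0, 0, 0, 0, 0)
  [("A_total", s.1), ("A_logé", s.2.1), ("B_total", s.2.2.1), ("B_logé", s.2.2.2.1),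
   ("C_total", s.2.2.2.2.1), ("C_logé", s.2.2.2.2.2)]

-- ===== PRECONDITION & SPEC =====
-- Pre_ excludes exactly the inputs where Python A raises KeyError: an item without a 'cat' key,
-- or an item of category A/B/C without a 'thurne' key.
def Pre_extract_kpi (raw_simulation_result : List (List (String × String))) : Prop :=
  (raw_simulation_result.all (fun i =>
    ((PySem.Dict.mk i).get? "cat").isSome &&
    (!((PySem.Dict.mk i).getD "cat" "" == "A" || (PySem.Dict.mk i).getD "cat" "" == "B" ||
       (PySem.Dict.mk i).getD "cat" "" == "C") ||
     ((PySem.Dict.mk i).get? "thurne").isSome))) = true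
instance (raw_simulation_result : List (List (String × String))) : Decidable (Pre_extract_kpi raw_simulation_result) := by unfold Pre_extract_kpi; infer_instance
def pvWitness_extract_kpi : (List (List (String × String))) :=
  [[("cat", "A"), ("thurne", "yes")], [("cat", "B"), ("thurne", "")], [("cat", "D")]]
def Spec_extract_kpi (raw_simulation_result : List (List (String × String))) (out : List (String × Int)) : Prop := out = extract_kpi_alt raw_simulation_result
instance (raw_simulation_result : List (List (String × String))) (out : List (String × Int)) : Decidable (Spec_extract_kpi raw_simulation_result out) := by unfold Spec_extract_kpi; infer_instance

-- ===== CLAIM (what is proved, stated in full; the proofs are below) =====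
def Claim_equal_extract_kpi : Prop := ∀ (raw_simulation_result : List (List (String × String))), Dom_extract_kpi raw_simulation_result → Pre_extract_kpi raw_simulation_result → Spec_extract_kpi raw_simulation_result (extract_kpi raw_simulation_result)

-- ===== LEMMAS AND PROOFS =====


-- predicate abbreviations used only by the proofs
def pvCat (c : String) (i : List (String × String)) : Bool := (PySem.Dict.mk i).getD "cat" "" == c
def pvTr (i : List (String × String)) : Bool := decide ((PySem.Dict.mk i).getD "thurne" "" ≠ "")
def pvStep (s : Int × Int × Int × Int × Int × Int) (i : List (String × String)) :
    Int × Int × Int × Int × Int × Int :=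
  let (ta, la, tb, lb, tc, lc) := s
  let cat := (PySem.Dict.mk i).getD "cat" ""
  if cat == "A" then
    (ta + 1, (if (PySem.Dict.mk i).getD "thurne" "" ≠ "" then la + 1 else la), tb, lb, tc, lc)
  else if cat == "B" then
    (ta, la, tb + 1, (if (PySem.Dict.mk i).getD "thurne" "" ≠ "" then lb + 1 else lb), tc, lc)
  else if cat == "C" then
    (ta, la, tb, lb, tc + 1, (if (PySem.Dict.mk i).getD "thurne" "" ≠ "" then lc + 1 else lc))
  else s

lemma pv_foldl_count (l : List (List (String × String))) (s : Int) :
    l.foldl (fun acc i => if (PySem.Dict.mk i).getD "thurne" "" ≠ "" then acc + 1 else acc) s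
      = s + (l.countP pvTr : Int) := by
  induction l generalizing s with
  | nil => simp
  | cons x t ih =>
    simp only [List.foldl_cons, List.countP_cons, ih, pvTr]
    by_cases h : (PySem.Dict.mk x).getD "thurne" "" ≠ "" <;> simp [h] <;> push_cast <;> ring

lemma pv_loop (raw : List (List (String × String))) (ta la tb lb tc lc : Int) :
    raw.foldl pvStep (ta, la, tb, lb, tc, lc) =
      (ta + (raw.countP (pvCat "A") : Int),
       la + (raw.countP (fun i => pvTr i && pvCat "A" i) : Int),
       tb + (raw.countP (pvCat "B") : Int),
       lb + (raw.countP (fun i => pvTr i && pvCat "B" i) : Int),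
       tc + (raw.countP (pvCat "C") : Int),
       lc + (raw.countP (fun i => pvTr i && pvCat "C" i) : Int)) := by
  induction raw generalizing ta la tb lb tc lc with
  | nil => simp
  | cons x t ih =>
    simp only [List.foldl_cons, List.countP_cons, pvStep, pvCat, pvTr]
    by_cases hA : ((PySem.Dict.mk x).getD "cat" "" == "A") = true <;>
      by_cases hB : ((PySem.Dict.mk x).getD "cat" "" == "B") = true <;>
        by_cases hC : ((PySem.Dict.mk x).getD "cat" "" == "C") = true <;>
          by_cases hT : (PySem.Dict.mk x).getD "thurne" "" ≠ "" <;>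
            simp_all [ih, pvCat, pvTr] <;> omega

lemma extract_kpi_eq (raw : List (List (String × String))) : extract_kpi raw =
    [("A_total", ((raw.filter (pvCat "A")).length : Int)),
     ("A_logé", (raw.filter (pvCat "A")).foldl (fun acc i => if (PySem.Dict.mk i).getD "thurne" "" ≠ "" then acc + 1 else acc) 0),
     ("B_total", ((raw.filter (pvCat "B")).length : Int)),
     ("B_logé", (raw.filter (pvCat "B")).foldl (fun acc i => if (PySem.Dict.mk i).getD "thurne" "" ≠ "" then acc + 1 else acc) 0),
     ("C_total", ((raw.filter (pvCat "C")).length : Int)),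
     ("C_logé", (raw.filter (pvCat "C")).foldl (fun acc i => if (PySem.Dict.mk i).getD "thurne" "" ≠ "" then acc + 1 else acc) 0)] := by
  simp only [extract_kpi, pvCat]
  rfl

lemma pv_component (c : String) (raw : List (List (String × String))) :
    (raw.filter (pvCat c)).foldl (fun acc i => if (PySem.Dict.mk i).getD "thurne" "" ≠ "" then acc + 1 else acc) 0
      = (raw.countP (fun i => pvTr i && pvCat c i) : Int) := by
  rw [pv_foldl_count, List.countP_filter]
  simp

-- ===== VERDICT (by name: the statement is the Claim_ definition above) =====
theorem extract_kpi_spec : Claim_equal_extract_kpi := by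
  intro raw _ _
  unfold Spec_extract_kpi extract_kpi_alt
  rw [extract_kpi_eq]
  rw [show (fun (s : Int × Int × Int × Int × Int × Int) (i : List (String × String)) =>
        (fun (ta la tb lb tc lc : Int) =>
          let cat := (PySem.Dict.mk i).getD "cat" ""
          if cat == "A" then
            (ta + 1, (if (PySem.Dict.mk i).getD "thurne" "" ≠ "" then la + 1 else la), tb, lb, tc, lc)
          else if cat == "B" then
            (ta, la, tb + 1, (if (PySem.Dict.mk i).getD "thurne" "" ≠ "" then lb + 1 else lb), tc, lc)
          else if cat == "C" then
            (ta, la, tb, lb, tc + 1, (if (PySem.Dict.mk i).getD "thurne" "" ≠ "" then lc + 1 else lc))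
          else (ta, la, tb, lb, tc, lc)) s.1 s.2.1 s.2.2.1 s.2.2.2.1 s.2.2.2.2.1 s.2.2.2.2.2) = pvStep
      from by funext s i; simp [pvStep]]
  rw [pv_loop]
  simp only [zero_add]
  rw [pv_component "A" raw, pv_component "B" raw, pv_component "C" raw]
  simp [List.countP_eq_length_filter]
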